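-- pv_equiv track=rewrite | github.com/a1029/algorithm | programmers/카카오_2019/무지의 먹방 라이브.py | solution
-- ===== SOURCE A (Python) =====
-- import heapq
--
-- def solution(food_times, k):
--
--     if sum(food_times) <= k:
--         return -1
--
--     q = []
--     for i,time in enumerate(food_times):
--         heapq.heappush(q, (time, i+1))
--
--     ate_time = 0
--     prev = 0
--     length = len(food_times)
--     while ate_time + (q[0][0]-prev)*length <= k:
--         now = heapq.heappop(q)[0]
--         ate_time += (now-prev) * length
--         prev = now
--         length -= 1
--
--     q.sort(key=lambda x:x[1])
--     return q[(k-ate_time)%length][1]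
-- ===== SOURCE B (Python) =====
-- def solution(food_times, k):
--     if sum(food_times) <= k:
--         return -1
--     n = len(food_times)
--     items = sorted((t, i + 1) for i, t in enumerate(food_times))
--     prefix = [0] * (n + 1)
--     for j in range(n):
--         prefix[j + 1] = prefix[j] + items[j][0]
--
--     def ate(j):
--         # total time eaten once the j smallest foods are finished:
--         # their full times plus items[j-1] bites of each of the n-j others
--         if j == 0:
--             return 0
--         return prefix[j] + items[j - 1][0] * (n - j)
--
--     lo, hi = 0, n - 1
--     while lo < hi:
--         mid = (lo + hi + 1) // 2
--         if ate(mid) <= k: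
--             lo = mid
--         else:
--             hi = mid - 1
--     j = lo
--     rest = sorted(items[j:], key=lambda x: x[1])
--     return rest[(k - ate(j)) % (n - j)][1]
-- ===== Notes on version B (the rewrite author's own statement) =====
-- stated objective: alternative
-- what changed: Replaces A's step-by-step heap simulation of the eating process (heappush build + heappop while-loop accumulating ate_time) by a closed-form elapsed-time formula ate(j) = prefix[j] + items[j-1]*(n-j) over one sorted list with prefix sums, and a binary search for the number of finished foods.
import Mathlib
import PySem

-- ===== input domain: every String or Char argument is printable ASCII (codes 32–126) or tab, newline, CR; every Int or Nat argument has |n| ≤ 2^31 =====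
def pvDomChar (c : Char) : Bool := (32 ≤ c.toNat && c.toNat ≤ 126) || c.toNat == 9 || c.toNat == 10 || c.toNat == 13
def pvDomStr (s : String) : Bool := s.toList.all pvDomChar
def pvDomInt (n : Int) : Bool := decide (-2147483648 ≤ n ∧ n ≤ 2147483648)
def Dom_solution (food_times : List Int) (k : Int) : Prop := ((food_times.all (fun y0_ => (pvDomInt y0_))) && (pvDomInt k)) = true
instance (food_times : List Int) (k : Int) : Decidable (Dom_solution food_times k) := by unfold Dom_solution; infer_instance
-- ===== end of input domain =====

-- B replaces A's step-by-step heap simulation of the eating process by a closed-form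
-- elapsed-time formula over prefix sums and a binary search for the number of finished
-- foods; return values proved equal.

-- ===== PORT A =====
-- heapq on distinct (time, index) pairs is a min-priority queue under the lexicographic
-- tuple order; it is ported as the corresponding sorted-list queue: heappush = ordered
-- insert (PySem.List.insertBy with the tuple '<'), heappop = take the head.
def heapLt (a b : Int × Int) : Bool :=
  decide (a.1 < b.1) || (!decide (b.1 < a.1) && decide (a.2 < b.2))

-- the while loop: pops from q while the condition holds; returns (q, ate_time, length).
-- When q is empty Python's 'q[0]' raises IndexError; the port returns the state there
-- (reachable only outside Pre_solution).
def eatLoopA (q : List (Int × Int)) (ate prev length k : Int) :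
    List (Int × Int) × Int × Int :=
  match q with
  | [] => ([], ate, length)
  | (t, i) :: rest =>
    if ate + (t - prev) * length ≤ k then
      eatLoopA rest (ate + (t - prev) * length) t (length - 1) k
    else ((t, i) :: rest, ate, length)

def solution (food_times : List Int) (k : Int) : Int :=
  if food_times.sum ≤ k then -1
  else
    let q := (PySem.List.enumerate food_times).foldl
      (fun acc p => PySem.List.insertBy heapLt (p.2, p.1 + 1) acc) []
    let r := eatLoopA q 0 0 (food_times.length : Int) k
    let qs := PySem.List.sorted r.1 (fun x => x.2) false
    -- q[(k-ate_time)%length][1]; none (ZeroDivisionError / IndexError) only outside Pre_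
    match PySem.Int.mod? (k - r.2.1) r.2.2 with
    | none => 0
    | some m =>
      match PySem.List.pyGet? qs m with
      | some p => p.2
      | none => 0

-- ===== PORT B =====
-- prefix = [0]*(n+1); for j in range(n): prefix[j+1] = prefix[j] + items[j][0]
-- (the loop always writes right after the last filled cell: appending the running last)
def buildPrefix (items : List (Int × Int)) : List Int :=
  items.foldl (fun acc p => acc ++ [acc.getLastD 0 + p.1]) [0]

-- def ate(j): 0 if j == 0 else prefix[j] + items[j-1][0]*(n-j)
def ateB (pre : List Int) (items : List (Int × Int)) (n j : Int) : Int :=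
  if j = 0 then 0
  else PySem.List.pyGetD pre j 0 + (PySem.List.pyGetD items (j - 1) (0, 0)).1 * (n - j)

-- while lo < hi: mid = (lo+hi+1)//2; if test(mid): lo = mid else: hi = mid-1
def bsLoop (p : Nat → Bool) (lo hi : Nat) : Nat :=
  if h : lo < hi then
    if p ((lo + hi + 1) / 2) then bsLoop p ((lo + hi + 1) / 2) hi
    else bsLoop p lo ((lo + hi + 1) / 2 - 1)
  else lo
termination_by hi - lo
decreasing_by
  · omega
  · omega

def solution_alt (food_times : List Int) (k : Int) : Int :=
  if food_times.sum ≤ k then -1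
  else
    let n : Int := (food_times.length : Int)
    let items := PySem.List.sorted2
      ((PySem.List.enumerate food_times).map (fun p => (p.2, p.1 + 1)))
      (fun x => x.1) (fun x => x.2) false
    let pre := buildPrefix items
    let j := bsLoop (fun m => decide (ateB pre items n (m : Int) ≤ k)) 0
      (food_times.length - 1)
    let rest := PySem.List.sorted (items.drop j) (fun x => x.2) false
    -- (k - ate(j)) % (n - j); none (ZeroDivisionError) only outside Pre_
    match PySem.Int.mod? (k - ateB pre items n (j : Int)) (n - (j : Int)) with
    | none => 0
    | some m =>
      match PySem.List.pyGet? rest m with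
      | some p => p.2
      | none => 0

-- ===== PRECONDITION & SPEC =====
-- A raises (IndexError at q[0]) exactly on the empty list with k < 0; B raises there too
-- (ZeroDivisionError). Every other input in Dom is admitted.
def Pre_solution (food_times : List Int) (k : Int) : Prop :=
  food_times ≠ [] ∨ 0 ≤ k
instance (food_times : List Int) (k : Int) : Decidable (Pre_solution food_times k) := by
  unfold Pre_solution; infer_instance
def pvWitness_solution : List Int × Int := ([3, 1, 2], 5)

def Spec_solution (food_times : List Int) (k : Int) (out : Int) : Prop := out = solution_alt food_times k
instance (food_times : List Int) (k : Int) (out : Int) : Decidable (Spec_solution food_times k out) := by unfold Spec_solution; infer_instance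

-- ===== CLAIM (what is proved, stated in full; the proofs are below) =====
def Claim_equal_solution : Prop := ∀ (food_times : List Int) (k : Int), Dom_solution food_times k → Pre_solution food_times k → Spec_solution food_times k (solution food_times k)

-- ===== LEMMAS AND PROOFS =====

-- A's insort-built heap IS B's sorted list: both are the same foldl of insertBy.
lemma heap_eq_sorted2 (food_times : List Int) :
    (PySem.List.enumerate food_times).foldl
      (fun acc p => PySem.List.insertBy heapLt (p.2, p.1 + 1) acc) []
    = PySem.List.sorted2
        ((PySem.List.enumerate food_times).map (fun p => ((p.2 : Int), p.1 + 1)))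
        (fun x => x.1) (fun x => x.2) false := by
  simp only [PySem.List.sorted2, List.foldl_map]
  rfl

-- running prefix sums, as a bare scan
def scanFrom (s : Int) : List Int → List Int
  | [] => []
  | t :: ts => (s + t) :: scanFrom (s + t) ts

-- time of the last finished food after j foods are done (0 before the first)
def prevC (items : List (Int × Int)) (j : Nat) : Int :=
  if j = 0 then 0 else (items.getD (j - 1) (0, 0)).1

-- closed-form elapsed time after the first j foods (in sorted order) are finished
def ateC (items : List (Int × Int)) (j : Nat) : Int :=
  ((items.take j).map Prod.fst).sum + prevC items j * ((items.length : Int) - (j : Int))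

-- the stop index of A's loop: least j that is n or whose next step would overrun k
def stopIdx (items : List (Int × Int)) (k : Int) : Nat :=
  Nat.find (p := fun j => j = items.length ∨ k < ateC items (j + 1))
    ⟨items.length, Or.inl rfl⟩

lemma foldl_scan (items : List (Int × Int)) (acc : List Int) :
    items.foldl (fun a p => a ++ [a.getLastD 0 + p.1]) acc
      = acc ++ scanFrom (acc.getLastD 0) (items.map Prod.fst) := by
  induction items generalizing acc with
  | nil => simp [scanFrom]
  | cons t ts ih =>
    simp only [List.foldl_cons, ih, scanFrom, List.map_cons]
    simp

lemma scanFrom_getD (ts : List Int) (s : Int) (j : Nat) (hj : j < ts.length) :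
    (scanFrom s ts).getD j 0 = s + (ts.take (j + 1)).sum := by
  induction ts generalizing s j with
  | nil => simp at hj
  | cons t ts ih =>
    cases j with
    | zero => simp [scanFrom]
    | succ j =>
      simp only [scanFrom, List.getD_cons_succ, List.take_succ_cons, List.sum_cons]
      rw [ih _ j (by simpa using hj)]
      ring

lemma buildPrefix_getD (items : List (Int × Int)) (j : Nat) (hj : j ≤ items.length) :
    (buildPrefix items).getD j 0 = ((items.take j).map Prod.fst).sum := by
  unfold buildPrefix
  rw [foldl_scan]
  cases j with
  | zero => simp
  | succ j =>
    rw [show ([(0 : Int)]).getLastD 0 = 0 from rfl]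
    simp only [List.singleton_append, List.getD_cons_succ]
    rw [scanFrom_getD _ _ j (by simpa using hj)]
    simp [List.map_take]

-- ateB (the port's ate) agrees with the closed form ateC
lemma ateB_eq_ateC (items : List (Int × Int)) (j : Nat) (hj : j ≤ items.length) :
    ateB (buildPrefix items) items (items.length : Int) (j : Int) = ateC items j := by
  cases j with
  | zero => simp [ateB, ateC, prevC]
  | succ j =>
    have hne : ((j + 1 : Nat) : Int) ≠ 0 := by push_cast; omega
    simp only [ateB, ateC, prevC, if_neg hne, if_neg (Nat.succ_ne_zero j)]
    rw [show ((j + 1 : Nat) : Int) - 1 = ((j : Nat) : Int) from by push_cast; ring]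
    rw [PySem.List.pyGetD_natCast, PySem.List.pyGetD_natCast]
    rw [buildPrefix_getD items (j + 1) hj]
    norm_num

-- one step of the closed form
lemma ateC_step (items : List (Int × Int)) (j : Nat) (hj : j < items.length) :
    ateC items (j + 1)
      = ateC items j + ((items.getD j (0, 0)).1 - prevC items j)
          * ((items.length : Int) - (j : Int)) := by
  have hget : items.getD j (0, 0) = items[j] := List.getD_eq_getElem _ _ hj
  have htake : items.take (j + 1) = items.take j ++ [items[j]] := by
    rw [List.take_add_one, List.getElem?_eq_getElem hj]; rfl
  unfold ateC
  rw [htake]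
  simp only [prevC, List.map_append, List.sum_append, List.map_cons, List.map_nil,
    List.sum_cons, List.sum_nil, Nat.succ_ne_zero, if_false,
    Nat.add_sub_cancel, hget]
  by_cases h0 : j = 0
  · subst h0; simp; ring
  · rw [if_neg h0]
    push_cast
    ring

-- monotonicity of the closed form from index 1 on, on a time-sorted list
lemma ateC_mono (items : List (Int × Int))
    (hp : items.Pairwise (fun a b => a.1 ≤ b.1)) (i j : Nat)
    (h1 : 1 ≤ i) (hij : i ≤ j) (hj : j ≤ items.length) :
    ateC items i ≤ ateC items j := by
  induction j with
  | zero => omega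
  | succ j ih =>
    rcases Nat.lt_or_ge i (j + 1) with hlt | hge
    · have hji : j < items.length := by omega
      have := ih (by omega) (by omega)
      refine le_trans this ?_
      rw [ateC_step items j hji]
      have hj1 : 1 ≤ j := by omega
      have hprev : prevC items j = (items.getD (j-1) (0,0)).1 := by
        unfold prevC; rw [if_neg (by omega)]
      have hle : prevC items j ≤ (items.getD j (0, 0)).1 := by
        rw [hprev, List.getD_eq_getElem _ _ (by omega : j - 1 < items.length),
            List.getD_eq_getElem _ _ hji]
        have := List.pairwise_iff_getElem.mp hp (j-1) j (by omega) hji (by omega)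
        exact this
      nlinarith [sub_nonneg.mpr hle,
        (by push_cast; omega : (0:Int) ≤ (items.length : Int) - (j : Int))]
    · have : i = j + 1 := by omega
      subst this; rfl

-- total elapsed time after all foods equals the plain sum
lemma ateC_full (items : List (Int × Int)) :
    ateC items items.length = (items.map Prod.fst).sum := by
  simp [ateC, prevC]

-- the stop index is at most n
lemma stopIdx_le (items : List (Int × Int)) (k : Int) :
    stopIdx items k ≤ items.length := by
  unfold stopIdx; exact Nat.find_le (Or.inl rfl)

lemma stopIdx_spec (items : List (Int × Int)) (k : Int) :
    stopIdx items k = items.length ∨ k < ateC items (stopIdx items k + 1) := by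
  unfold stopIdx
  exact Nat.find_spec (p := fun j => j = items.length ∨ k < ateC items (j + 1))
    ⟨items.length, Or.inl rfl⟩

lemma stopIdx_min (items : List (Int × Int)) (k : Int) (m : Nat)
    (hm : m < stopIdx items k) :
    m ≠ items.length ∧ ateC items (m + 1) ≤ k := by
  unfold stopIdx at hm
  have := Nat.find_min (p := fun j => j = items.length ∨ k < ateC items (j + 1))
    ⟨items.length, Or.inl rfl⟩ hm
  push_neg at this
  exact this

lemma stopIdx_le_of (items : List (Int × Int)) (k : Int) (m : Nat)
    (hm : m = items.length ∨ k < ateC items (m + 1)) :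
    stopIdx items k ≤ m := by
  unfold stopIdx; exact Nat.find_le hm

-- A's loop, started at any j ≤ stopIdx with the matching closed-form state,
-- runs to the stop index
lemma eatLoopA_spec (items : List (Int × Int)) (k : Int) (j : Nat)
    (hj : j ≤ stopIdx items k) :
    eatLoopA (items.drop j) (ateC items j) (prevC items j)
        ((items.length : Int) - (j : Int)) k
      = (items.drop (stopIdx items k), ateC items (stopIdx items k),
         (items.length : Int) - (stopIdx items k : Int)) := by
  have hstop := stopIdx_le items k
  by_cases hjs : j = stopIdx items k
  · subst hjs
    rcases stopIdx_spec items k with hn | hk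
    · -- stopIdx = n : the queue is empty, the loop returns
      rw [hn]
      simp [eatLoopA, List.drop_length]
    · -- the next step would overrun : the loop condition fails
      rcases Nat.lt_or_ge (stopIdx items k) items.length with hlt | hge
      · rw [List.drop_eq_getElem_cons hlt]
        rcases hp : items[stopIdx items k] with ⟨t, i⟩
        have hcond : ¬ (ateC items (stopIdx items k)
            + (t - prevC items (stopIdx items k))
              * ((items.length : Int) - (stopIdx items k : Int)) ≤ k) := by
          have := ateC_step items (stopIdx items k) hlt
          rw [List.getD_eq_getElem _ _ hlt, hp] at this
          simp only [not_le]
          linarith [this, hk]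
        simp only [eatLoopA, if_neg hcond]
      · have : stopIdx items k = items.length := by omega
        rw [this]
        simp [eatLoopA, List.drop_length]
  · -- j < stopIdx : the loop condition holds, recurse at j+1
    have hjlt : j < stopIdx items k := by omega
    obtain ⟨hne, hle⟩ := stopIdx_min items k j hjlt
    have hjn : j < items.length := by
      rcases Nat.lt_or_ge j items.length with h | h
      · exact h
      · exact absurd (by omega : j = items.length) hne
    rw [List.drop_eq_getElem_cons hjn]
    rcases hp : items[j] with ⟨t, i⟩
    have hstep := ateC_step items j hjn
    rw [List.getD_eq_getElem _ _ hjn, hp] at hstep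
    have hcond : ateC items j + (t - prevC items j)
        * ((items.length : Int) - (j : Int)) ≤ k := by linarith [hstep, hle]
    simp only [eatLoopA, if_pos hcond]
    have hprev : t = prevC items (j + 1) := by
      unfold prevC
      rw [if_neg (Nat.succ_ne_zero j), Nat.add_sub_cancel,
        List.getD_eq_getElem _ _ hjn, hp]
    have hres := eatLoopA_spec items k (j + 1) (by omega)
    rw [← hres, ← hstep, hprev]
    congr 1
    push_cast
    ring
termination_by stopIdx items k - j

-- specification of the binary-search loop for a predicate down-closed on [1, hi]
lemma bsLoop_spec (p : Nat → Bool) :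
    ∀ (d lo hi : Nat), hi - lo ≤ d → lo ≤ hi → (lo = 0 ∨ p lo = true) →
    (∀ i j, 1 ≤ i → i ≤ j → j ≤ hi → p j = true → p i = true) →
    lo ≤ bsLoop p lo hi ∧ bsLoop p lo hi ≤ hi ∧
      (bsLoop p lo hi = 0 ∨ p (bsLoop p lo hi) = true) ∧
      ∀ j, bsLoop p lo hi < j → j ≤ hi → p j = false := by
  intro d
  induction d with
  | zero =>
    intro lo hi hd hle hlo _
    have : lo = hi := by omega
    subst this
    rw [bsLoop, dif_neg (by omega)]
    exact ⟨le_refl _, le_refl _, hlo, fun j h1 h2 => absurd (by omega : j ≤ lo) (by omega)⟩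
  | succ d ih =>
    intro lo hi hd hle hlo hdc
    by_cases h : lo < hi
    · rw [bsLoop, dif_pos h]
      set mid := (lo + hi + 1) / 2 with hmid
      have hmid1 : lo < mid := by omega
      have hmid2 : mid ≤ hi := by omega
      by_cases hpm : p mid = true
      · rw [if_pos hpm]
        obtain ⟨a, b, c, e⟩ := ih mid hi (by omega) hmid2 (Or.inr hpm) hdc
        exact ⟨by omega, b, c, e⟩
      · rw [if_neg hpm]
        obtain ⟨a, b, c, e⟩ := ih lo (mid - 1) (by omega) (by omega) hlo
          (fun i j h1 h2 h3 hp => hdc i j h1 h2 (by omega) hp)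
        refine ⟨a, by omega, c, fun j hj1 hj2 => ?_⟩
        rcases Nat.lt_or_ge (mid - 1) j with hgt | hlt
        · by_cases hpj : p j = true
          · exact absurd (hdc mid j (by omega) (by omega) hj2 hpj) hpm
          · simpa using hpj
        · exact e j hj1 hlt
    · rw [bsLoop, dif_neg h]
      exact ⟨le_refl _, hle, hlo, fun j h1 h2 => absurd (by omega : j ≤ lo) (by omega)⟩

-- on a time-sorted list whose total exceeds k, the binary search lands on the stop index
lemma bsLoop_eq_stopIdx (items : List (Int × Int)) (k : Int)
    (hp : items.Pairwise (fun a b => a.1 ≤ b.1))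
    (hn : 1 ≤ items.length) (hk : k < ateC items items.length) :
    bsLoop (fun m => decide (ateB (buildPrefix items) items (items.length : Int)
        (m : Int) ≤ k)) 0 (items.length - 1) = stopIdx items k := by
  set P : Nat → Bool := fun m =>
    decide (ateB (buildPrefix items) items (items.length : Int) (m : Int) ≤ k) with hP
  have hPc : ∀ m, m ≤ items.length → (P m = true ↔ ateC items m ≤ k) := by
    intro m hm
    simp [hP, ateB_eq_ateC items m hm]
  have hdc : ∀ i j, 1 ≤ i → i ≤ j → j ≤ items.length - 1 → P j = true → P i = true := by
    intro i j h1 h2 h3 hpj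
    have := (hPc j (by omega)).mp hpj
    exact (hPc i (by omega)).mpr
      (le_trans (ateC_mono items hp i j h1 h2 (by omega)) this)
  obtain ⟨a, b, c, e⟩ := bsLoop_spec P (items.length - 1) 0 (items.length - 1)
    (by omega) (by omega) (Or.inl rfl) hdc
  set R := bsLoop P 0 (items.length - 1) with hR
  -- the stop index is at most n-1 because finishing everything overruns k
  have hstop : stopIdx items k ≤ items.length - 1 := by
    apply stopIdx_le_of
    right
    rw [show items.length - 1 + 1 = items.length by omega]
    exact hk
  -- the stop index satisfies P (or is 0)
  have hPs : stopIdx items k = 0 ∨ P (stopIdx items k) = true := by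
    rcases Nat.eq_zero_or_pos (stopIdx items k) with h0 | h0
    · exact Or.inl h0
    · right
      have hnQ := stopIdx_min items k (stopIdx items k - 1) (by omega)
      rw [show stopIdx items k - 1 + 1 = stopIdx items k by omega] at hnQ
      exact (hPc _ (by omega)).mpr hnQ.2
  -- antisymmetry
  rcases Nat.lt_trichotomy R (stopIdx items k) with hlt | heq | hgt
  · exfalso
    have hPs' : P (stopIdx items k) = true := by
      rcases hPs with h0 | h
      · omega
      · exact h
    have := e (stopIdx items k) hlt hstop
    rw [hPs'] at this
    exact absurd this (by simp)
  · exact heq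
  · exfalso
    have hPR : P R = true := by
      rcases c with h0 | h
      · omega
      · exact h
    have hRle : ateC items R ≤ k := (hPc R (by omega)).mp hPR
    rcases stopIdx_spec items k with hn' | hk'
    · omega
    · have := ateC_mono items hp (stopIdx items k + 1) R (by omega) (by omega) (by omega)
      omega

-- the sorted list is pairwise nondecreasing in the time component
lemma insertBy_pairwise_fst (x : Int × Int) (ys : List (Int × Int))
    (h : ys.Pairwise (fun a b => a.1 ≤ b.1)) :
    (PySem.List.insertBy heapLt x ys).Pairwise (fun a b => a.1 ≤ b.1) := by
  induction ys with
  | nil => simp [PySem.List.insertBy]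
  | cons y ys ih =>
    rw [PySem.List.insertBy]
    by_cases hb : heapLt x y = true
    · rw [if_pos hb]
      have hxy : x.1 ≤ y.1 := by
        simp only [heapLt, Bool.or_eq_true, Bool.and_eq_true, Bool.not_eq_true',
          decide_eq_true_eq, decide_eq_false_iff_not] at hb
        rcases hb with h1 | ⟨h1, _⟩ <;> omega
      refine List.Pairwise.cons ?_ h
      intro z hz
      rcases List.mem_cons.mp hz with rfl | hz'
      · exact hxy
      · exact le_trans hxy (List.rel_of_pairwise_cons h hz')
    · rw [if_neg hb]
      have hyx : y.1 ≤ x.1 := by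
        simp only [heapLt, Bool.or_eq_true, Bool.and_eq_true, Bool.not_eq_true',
          decide_eq_true_eq, decide_eq_false_iff_not] at hb
        push_neg at hb
        omega
      refine List.Pairwise.cons ?_ (ih (List.Pairwise.of_cons h))
      intro z hz
      rcases (PySem.List.mem_insertBy _ _ _ _).mp hz with rfl | hz'
      · exact hyx
      · exact List.rel_of_pairwise_cons h hz'

lemma foldl_insertBy_pairwise_fst (xs acc : List (Int × Int))
    (h : acc.Pairwise (fun a b => a.1 ≤ b.1)) :
    (xs.foldl (fun acc x => PySem.List.insertBy heapLt x acc) acc).Pairwise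
      (fun a b => a.1 ≤ b.1) := by
  induction xs generalizing acc with
  | nil => exact h
  | cons x xs ih => exact ih _ (insertBy_pairwise_fst x acc h)

lemma sorted2_pairwise_fst (xs : List (Int × Int)) :
    (PySem.List.sorted2 xs (fun x => x.1) (fun x => x.2) false).Pairwise
      (fun a b => a.1 ≤ b.1) := by
  have : PySem.List.sorted2 xs (fun x => x.1) (fun x => x.2) false
      = xs.foldl (fun acc x => PySem.List.insertBy heapLt x acc) [] := rfl
  rw [this]
  exact foldl_insertBy_pairwise_fst xs [] (List.Pairwise.nil)

-- ===== VERDICT (by name: the statement is the Claim_ definition above) =====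
theorem solution_spec : Claim_equal_solution := by
  intro ft k _ hpre
  unfold Spec_solution solution solution_alt
  by_cases hs : ft.sum ≤ k
  · simp [hs]
  · simp only [hs, if_false]
    rw [heap_eq_sorted2]
    set items := PySem.List.sorted2
      ((PySem.List.enumerate ft).map (fun p => ((p.2 : Int), p.1 + 1)))
      (fun x => x.1) (fun x => x.2) false with hitems
    have hperm0 := PySem.List.sorted2_perm
      ((PySem.List.enumerate ft).map (fun p => ((p.2 : Int), p.1 + 1)))
      (fun x => x.1) (fun x => x.2) false
    have hlen : items.length = ft.length := by
      rw [← hitems] at hperm0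
      rw [hperm0.length_eq]
      simp [PySem.List.length_enumerate]
    have hperm : (items.map Prod.fst).Perm ft := by
      rw [← hitems] at hperm0
      have h1 := hperm0.map Prod.fst
      rw [List.map_map] at h1
      have h2 : ((PySem.List.enumerate ft).map
          (Prod.fst ∘ fun p => ((p.2 : Int), p.1 + 1))) = ft := by
        rw [show (Prod.fst ∘ fun p : Int × Int => ((p.2 : Int), p.1 + 1))
            = (fun p : Int × Int => p.2) from rfl]
        exact PySem.List.map_snd_enumerate ft 0
      rw [h2] at h1
      exact h1
    have hsum : (items.map Prod.fst).sum = ft.sum := hperm.sum_eq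
    have hn1 : 1 ≤ ft.length := by
      rcases ft with _ | ⟨a, l⟩
      · exfalso
        rcases hpre with h | h
        · exact h rfl
        · exact hs (by simpa using h)
      · simp
    have hk : k < ateC items items.length := by
      rw [ateC_full, hsum]; omega
    have hpair : items.Pairwise (fun a b => a.1 ≤ b.1) := sorted2_pairwise_fst _
    have hA := eatLoopA_spec items k 0 (Nat.zero_le _)
    have h00 : ateC items 0 = 0 := by simp [ateC, prevC]
    have hp0 : prevC items 0 = 0 := rfl
    rw [List.drop_zero, h00, hp0] at hA
    norm_num at hA
    have hB := bsLoop_eq_stopIdx items k hpair (by omega) hk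
    rw [show ft.length = items.length from hlen.symm]
    rw [hA, hB, ateB_eq_ateC items (stopIdx items k) (stopIdx_le items k)]
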